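-- pv_equiv track=rewrite | github.com/Adamits/decoder-only-inflection | analysis/scripts/get_error_trigrams.py | get_pred_ngrams
-- ===== SOURCE A (Python) =====
-- from typing import List
--
-- UPDATE_SOURCE_ACTIONS = set(["D", "S"])
--
-- UPDATE_TARGET_ACTION = "I"
--
-- def get_trigrams(p: str, i: int) -> List[str]:
--     """Gets all trigrams in p involving the position i
--
--     Args:
--         p (str): _description_
--         i (int): _description_
--
--     Returns:
--         List[str]: _description_
--     """
--     # One-liner for trigrams, where we get all trigrams in the
--     # substring from i-2 to i+3.
--     trigrams =  list(zip(*[p[max(i-2, 0): i+3][j:] for j in range(3)]))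
--     return trigrams
--
-- def get_pred_ngrams(pred, action, gold):
--     last_is_action = False
--     ngrams = []
--     ctx_trgrams = []
--     for i, (p, a) in enumerate(zip(pred, action)):
--         # If the action is on the existing source string
--         # then we track src ngrams
--         if a in UPDATE_SOURCE_ACTIONS:
--             # Removes the \x00's that are there to keep alignment.
--             ctx_trgrams.extend(get_trigrams([p for p in pred if p != "\x00"], i))
--             if last_is_action:
--                 ngrams[-1] += p
--             else:
--                 ngrams.append(p)
--                 last_is_action = True
--         # If the action entails inserting a char
--         # then we have no source ngram.
--         elif a == UPDATE_TARGET_ACTION: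
--             continue
--         else:
--             last_is_action = False
--
--     return ngrams, ctx_trgrams
-- ===== SOURCE B (Python) =====
-- from itertools import groupby
-- from typing import List
--
-- UPDATE_SOURCE_ACTIONS = set(["D", "S"])
--
-- UPDATE_TARGET_ACTION = "I"
--
--
-- def get_trigrams(p: str, i: int) -> List[str]:
--     """Gets all trigrams in p involving the position i (unchanged module helper)."""
--     trigrams = list(zip(*[p[max(i-2, 0): i+3][j:] for j in range(3)]))
--     return trigrams
--
--
-- def get_pred_ngrams(pred, action, gold):
--     pairs = list(zip(pred, action))
--     filtered = [c for c in pred if c != "\x00"]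
--     # Context trigrams: one comprehension over the enumerated pairs.
--     ctx_trgrams = [t
--                    for i, (p, a) in enumerate(pairs)
--                    if a in UPDATE_SOURCE_ACTIONS
--                    for t in get_trigrams(filtered, i)]
--     # Source ngrams: drop the 'I' steps (they are transparent), then group
--     # adjacent pairs by whether they are source-updating and join each
--     # source run into one ngram.
--     kept = [(p, a) for p, a in pairs if a != UPDATE_TARGET_ACTION]
--     ngrams = ["".join(p for p, _ in grp)
--               for is_src, grp in groupby(kept, key=lambda pa: pa[1] in UPDATE_SOURCE_ACTIONS)
--               if is_src]
--     return ngrams, ctx_trgrams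
-- ===== Notes on version B (the rewrite author's own statement) =====
-- stated objective: simpler
-- what changed: Replaces the stateful last_is_action accumulator loop with two independent passes: a single comprehension over enumerate(pairs) for the context trigrams, and a filter-then-itertools.groupby that joins each adjacent run of source actions ('I' steps dropped first, since they are transparent) into one ngram.
import Mathlib
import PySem

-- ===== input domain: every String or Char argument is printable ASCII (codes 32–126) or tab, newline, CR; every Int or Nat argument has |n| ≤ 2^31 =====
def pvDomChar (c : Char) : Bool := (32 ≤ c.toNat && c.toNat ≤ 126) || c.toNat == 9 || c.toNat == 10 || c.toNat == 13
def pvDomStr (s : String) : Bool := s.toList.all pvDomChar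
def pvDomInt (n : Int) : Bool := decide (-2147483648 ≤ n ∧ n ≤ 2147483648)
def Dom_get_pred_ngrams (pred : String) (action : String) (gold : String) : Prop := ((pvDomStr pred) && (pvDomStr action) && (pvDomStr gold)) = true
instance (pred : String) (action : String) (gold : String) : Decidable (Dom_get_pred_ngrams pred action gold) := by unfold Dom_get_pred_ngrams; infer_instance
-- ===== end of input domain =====

-- B replaces A's stateful last_is_action loop by two independent passes
-- (a comprehension for the trigrams; filter-then-groupby for the ngrams): simpler decomposition.

-- ===== PORT A =====
def UPDATE_SOURCE_ACTIONS : PySem.Set Char := PySem.Set.ofList ['D', 'S']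

def UPDATE_TARGET_ACTION : Char := 'I'

-- trigrams = list(zip(*[p[max(i-2,0):i+3][j:] for j in range(3)])); zip(*three lists) = elementwise triples
def getTrigrams (p : List Char) (i : Int) : List (String × String × String) :=
  let sub := PySem.List.slice p (some (max (i - 2) 0)) (some (i + 3))
  (sub.zip ((sub.drop 1).zip (sub.drop 2))).map
    (fun t => (String.ofList [t.1], String.ofList [t.2.1], String.ofList [t.2.2]))

-- the body of A's for-loop, over state (last_is_action, ngrams, ctx_trgrams)
def stepA (pred : String)
    (st : Bool × List String × List (String × String × String))
    (ipa : Int × Char × Char) :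
    Bool × List String × List (String × String × String) :=
  if PySem.Set.contains UPDATE_SOURCE_ACTIONS ipa.2.2 then
    let ctx' := st.2.2 ++ getTrigrams (pred.toList.filter (fun c => c != '\x00')) ipa.1
    if st.1 then
      (true, st.2.1.dropLast ++ [st.2.1.getLastD "" ++ String.ofList [ipa.2.1]], ctx')
    else
      (true, st.2.1 ++ [String.ofList [ipa.2.1]], ctx')
  else if ipa.2.2 == UPDATE_TARGET_ACTION then
    st  -- continue
  else
    (false, st.2.1, st.2.2)

def get_pred_ngrams (pred : String) (action : String) (gold : String) : List String × (List (String × String × String)) :=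
  let st := (PySem.List.enumerate (pred.toList.zip action.toList)).foldl (stepA pred) (false, [], [])
  (st.2.1, st.2.2)

-- ===== PORT B =====
def isSrcPair (pa : Char × Char) : Bool := PySem.Set.contains UPDATE_SOURCE_ACTIONS pa.2

-- itertools.groupby: adjacent runs with their key
def groupRuns {α : Type} (key : α → Bool) : List α → List (Bool × List α)
  | [] => []
  | x :: xs =>
    (key x, x :: xs.takeWhile (fun y => key y == key x)) ::
    groupRuns key (xs.dropWhile (fun y => key y == key x))
termination_by l => l.length
decreasing_by
  simp only [List.length_cons]
  exact Nat.lt_succ_of_le (List.length_dropWhile_le _ _)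

def get_pred_ngrams_alt (pred : String) (action : String) (gold : String) : List String × (List (String × String × String)) :=
  let pairs := pred.toList.zip action.toList
  let filtered := pred.toList.filter (fun c => c != '\x00')
  let ctx_trgrams := ((PySem.List.enumerate pairs).filter
      (fun ipa => PySem.Set.contains UPDATE_SOURCE_ACTIONS ipa.2.2)).flatMap
      (fun ipa => getTrigrams filtered ipa.1)
  let kept := pairs.filter (fun pa => pa.2 != UPDATE_TARGET_ACTION)
  let ngrams := (groupRuns isSrcPair kept).foldl
      (fun acc g => if g.1 then acc ++ [String.ofList (g.2.map Prod.fst)] else acc) []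
  (ngrams, ctx_trgrams)

-- ===== PRECONDITION & SPEC =====
def Spec_get_pred_ngrams (pred : String) (action : String) (gold : String) (out : List String × (List (String × String × String))) : Prop := out = get_pred_ngrams_alt pred action gold
instance (pred : String) (action : String) (gold : String) (out : List String × (List (String × String × String))) : Decidable (Spec_get_pred_ngrams pred action gold out) := by unfold Spec_get_pred_ngrams; infer_instance

-- ===== CLAIM (what is proved, stated in full; the proofs are below) =====
def Claim_equal_get_pred_ngrams : Prop := ∀ (pred : String) (action : String) (gold : String), Dom_get_pred_ngrams pred action gold → Spec_get_pred_ngrams pred action gold (get_pred_ngrams pred action gold)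

-- ===== LEMMAS AND PROOFS =====

-- proof-only recursions mirroring the three components of A's fold state
def finB : List (Int × Char × Char) → Bool → Bool
  | [], b => b
  | ipa :: l, b =>
    if PySem.Set.contains UPDATE_SOURCE_ACTIONS ipa.2.2 then finB l true
    else if ipa.2.2 == UPDATE_TARGET_ACTION then finB l b
    else finB l false

def ngN : List (Int × Char × Char) → Bool → List String → List String
  | [], _, ng => ng
  | ipa :: l, b, ng =>
    if PySem.Set.contains UPDATE_SOURCE_ACTIONS ipa.2.2 then
      if b then ngN l true (ng.dropLast ++ [ng.getLastD "" ++ String.ofList [ipa.2.1]])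
      else ngN l true (ng ++ [String.ofList [ipa.2.1]])
    else if ipa.2.2 == UPDATE_TARGET_ACTION then ngN l b ng
    else ngN l false ng

def ctxC (pred : String) : List (Int × Char × Char) → List (String × String × String) → List (String × String × String)
  | [], cx => cx
  | ipa :: l, cx =>
    if PySem.Set.contains UPDATE_SOURCE_ACTIONS ipa.2.2 then
      ctxC pred l (cx ++ getTrigrams (pred.toList.filter (fun c => c != '\x00')) ipa.1)
    else ctxC pred l cx

-- index-free 'I'-free ngram machine
def ngM : List (Char × Char) → Bool → List String → List String
  | [], _, ng => ng
  | pa :: l, b, ng =>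
    if isSrcPair pa then
      if b then ngM l true (ng.dropLast ++ [ng.getLastD "" ++ String.ofList [pa.1]])
      else ngM l true (ng ++ [String.ofList [pa.1]])
    else ngM l false ng

def stepG (acc : List String) (g : Bool × List (Char × Char)) : List String :=
  if g.1 then acc ++ [String.ofList (g.2.map Prod.fst)] else acc

def ngG (l : List (Char × Char)) : List String := (groupRuns isSrcPair l).foldl stepG []

lemma mk_append (a b : List Char) : String.ofList a ++ String.ofList b = String.ofList (a ++ b) := by simp

lemma split_foldl (pred : String) :
    ∀ (l : List (Int × Char × Char)) (b : Bool) (ng : List String) (cx : List (String × String × String)),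
      l.foldl (stepA pred) (b, ng, cx) = (finB l b, ngN l b ng, ctxC pred l cx) := by
  intro l
  induction l with
  | nil => intro b ng cx; simp [finB, ngN, ctxC]
  | cons ipa l ih =>
    intro b ng cx
    simp only [List.foldl_cons, finB, ngN, ctxC, stepA]
    split_ifs with h1 h2 h3 <;> simp [ih]

lemma ngN_filter :
    ∀ (l : List (Int × Char × Char)) (b : Bool) (ng : List String),
      ngN l b ng = ngM ((l.map (·.2)).filter (fun pa => pa.2 != UPDATE_TARGET_ACTION)) b ng := by
  intro l
  induction l with
  | nil => intro b ng; simp [ngN, ngM]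
  | cons ipa l ih =>
    intro b ng
    obtain ⟨i, p, a⟩ := ipa
    simp only [List.map_cons, ngN]
    by_cases hs : a ∈ UPDATE_SOURCE_ACTIONS
    · have ha : (a != UPDATE_TARGET_ACTION) = true := by
        have := hs
        simp [UPDATE_SOURCE_ACTIONS, PySem.Set.mem_ofList] at this
        rcases this with rfl | rfl <;> decide
      simp [hs, List.filter_cons, ha, ngM, isSrcPair, ih]
    · by_cases hi : a == UPDATE_TARGET_ACTION
      · have : (a != UPDATE_TARGET_ACTION) = false := by simp_all
        simp [hs, hi, List.filter_cons, this, ih]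
      · have : (a != UPDATE_TARGET_ACTION) = true := by simp_all
        simp [hs, hi, List.filter_cons, this, ngM, isSrcPair, ih]

lemma stepG_acc : ∀ (gs : List (Bool × List (Char × Char))) (acc : List String),
    gs.foldl stepG acc = acc ++ gs.foldl stepG [] := by
  intro gs
  induction gs with
  | nil => simp
  | cons g gs ih =>
    intro acc
    simp only [List.foldl_cons]
    rw [ih (stepG acc g), ih (stepG [] g)]
    unfold stepG
    split_ifs <;> simp

-- skipping a non-source element does not change the grouped ngrams
lemma ngG_cons_false (x : Char × Char) (l : List (Char × Char)) (hx : isSrcPair x = false) :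
    ngG (x :: l) = ngG l := by
  have unf : ngG (x :: l) = ngG (l.dropWhile (fun y => isSrcPair y == false)) := by
    unfold ngG
    rw [groupRuns]
    simp [hx, stepG]
  cases l with
  | nil => rw [unf]; simp
  | cons y l' =>
    by_cases hy : isSrcPair y
    · rw [unf]; simp [List.dropWhile_cons, hy]
    · have hy' : isSrcPair y = false := by simp_all
      have unf2 : ngG (y :: l') = ngG (l'.dropWhile (fun y => isSrcPair y == false)) := by
        unfold ngG
        rw [groupRuns]
        simp [hy', stepG]
      rw [unf, unf2]
      simp [hy']

lemma ngM_ngG :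
    ∀ (l : List (Char × Char)),
      (∀ ng, ngM l false ng = ng ++ ngG l) ∧
      (∀ (ng : List String) (s : String),
        ngM l true (ng ++ [s]) =
          ng ++ [s ++ String.ofList ((l.takeWhile isSrcPair).map Prod.fst)] ++ ngG (l.dropWhile isSrcPair)) := by
  intro l
  induction l with
  | nil =>
    constructor
    · intro ng; simp [ngM, ngG, groupRuns]
    · intro ng s; simp [ngM, ngG, groupRuns]
  | cons x l ih =>
    obtain ⟨ihF, ihT⟩ := ih
    by_cases hx : isSrcPair x
    · have gunf : ngG (x :: l) =
          [String.ofList (x.1 :: (l.takeWhile isSrcPair).map Prod.fst)] ++ ngG (l.dropWhile isSrcPair) := by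
        unfold ngG
        rw [groupRuns]
        simp only [hx, List.foldl_cons]
        rw [stepG_acc]
        congr 2
        · simp [stepG]
        · congr 1 <;> · congr 1; funext y; simp [hx]
      constructor
      · intro ng
        simp only [ngM, hx, if_pos, if_neg Bool.false_ne_true]
        rw [show ng ++ [String.ofList [x.1]] = ng ++ [String.ofList [x.1]] from rfl, ihT]
        simp [gunf, mk_append, List.takeWhile_cons, List.dropWhile_cons, hx]
      · intro ng s
        simp only [ngM, hx, if_pos]
        rw [List.dropLast_concat, List.getLastD_concat, ihT]
        simp [gunf, List.takeWhile_cons, List.dropWhile_cons, hx, String.append_assoc, mk_append]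
    · have hx' : isSrcPair x = false := by simp_all
      constructor
      · intro ng
        simp only [ngM, hx']
        rw [ihF, ngG_cons_false x l hx']
        simp
      · intro ng s
        simp only [ngM, hx']
        rw [show ng ++ [s] = ng ++ [s] from rfl, ihF (ng ++ [s])]
        simp [List.takeWhile_cons, List.dropWhile_cons, hx', ngG_cons_false x l hx']

lemma ctxC_flatMap (pred : String) :
    ∀ (l : List (Int × Char × Char)) (cx : List (String × String × String)),
      ctxC pred l cx = cx ++ (l.filter (fun ipa => PySem.Set.contains UPDATE_SOURCE_ACTIONS ipa.2.2)).flatMap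
        (fun ipa => getTrigrams (pred.toList.filter (fun c => c != '\x00')) ipa.1) := by
  intro l
  induction l with
  | nil => intro cx; simp [ctxC]
  | cons ipa l ih =>
    intro cx
    simp only [ctxC]
    by_cases hs : ipa.2.2 ∈ UPDATE_SOURCE_ACTIONS
    · rw [if_pos (by simpa using hs), ih]; simp [List.filter_cons, hs]
    · rw [if_neg (by simpa using hs), ih]; simp [List.filter_cons, hs]

-- ===== VERDICT (by name: the statement is the Claim_ definition above) =====
theorem get_pred_ngrams_spec : Claim_equal_get_pred_ngrams := by
  intro pred action gold _
  unfold Spec_get_pred_ngrams get_pred_ngrams get_pred_ngrams_alt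
  simp only [split_foldl]
  refine Prod.ext ?_ ?_ <;> simp only
  · rw [ngN_filter, PySem.List.map_snd_enumerate]
    have := (ngM_ngG ((pred.toList.zip action.toList).filter (fun pa => pa.2 != UPDATE_TARGET_ACTION))).1 []
    simp only [this, List.nil_append]
    rfl
  · rw [ctxC_flatMap]
    simp
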